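-- pv_equiv track=rewrite | github.com/superobserver/Conversations | Goldbach_Only.py | get_operators
-- ===== SOURCE A (Python) =====
-- ALL_CLASSES = [1,7,11,13,17,19,23,29,31,37,41,43,47,49,53,59,61,67,71,73,77,79,83,89]
--
-- def get_operators(k):
--     operators = []
--     seen = set()
--     for z in ALL_CLASSES:
--         try:
--             o = (k * pow(z, -1, 90)) % 90
--             if o not in ALL_CLASSES: continue
--             pair = tuple(sorted([z,o]))
--             if pair in seen: continue
--             seen.add(pair)
--             z_eff = 91 if z==1 else z
--             o_eff = 91 if o==1 else o
--             l = 180 - (z_eff + o_eff)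
--             m = 90 - (z_eff + o_eff) + (z_eff*o_eff - k)//90
--             operators.append((l,m,z_eff))
--             if z != o:
--                 operators.append((l,m,o_eff))
--         except: continue
--     return operators
-- ===== SOURCE B (Python) =====
-- ALL_CLASSES = [1,7,11,13,17,19,23,29,31,37,41,43,47,49,53,59,61,67,71,73,77,79,83,89]
--
-- def get_operators(k):
--     r = k % 90
--     operators = []
--     for i, z in enumerate(ALL_CLASSES):
--         for o in ALL_CLASSES[i:]:
--             if (z * o) % 90 != r:
--                 continue
--             z_eff = 91 if z == 1 else z
--             o_eff = 91 if o == 1 else o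
--             l = 180 - (z_eff + o_eff)
--             m = 90 - (z_eff + o_eff) + (z_eff * o_eff - k) // 90
--             operators.append((l, m, z_eff))
--             if z != o:
--                 operators.append((l, m, o_eff))
--     return operators
-- ===== Notes on version B (the rewrite author's own statement) =====
-- stated objective: simpler
-- what changed: B drops the modular inverse, the try/except and the seen-set dedup: it scans ordered pairs z <= o of classes (z over ALL_CLASSES, o over the tail from z) and keeps a pair exactly when (z*o) % 90 == k % 90, emitting the same triples in the same order.
import Mathlib
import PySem

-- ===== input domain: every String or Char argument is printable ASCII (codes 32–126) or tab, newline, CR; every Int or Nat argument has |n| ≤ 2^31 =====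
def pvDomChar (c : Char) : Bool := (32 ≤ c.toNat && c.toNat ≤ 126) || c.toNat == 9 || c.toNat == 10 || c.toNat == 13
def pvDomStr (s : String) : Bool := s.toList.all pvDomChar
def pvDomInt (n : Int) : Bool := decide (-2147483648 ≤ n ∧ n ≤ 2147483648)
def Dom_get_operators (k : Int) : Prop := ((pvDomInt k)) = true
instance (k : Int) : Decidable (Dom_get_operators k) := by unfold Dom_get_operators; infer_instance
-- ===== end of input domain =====

-- B drops the modular inverse, the try/except and the seen-set dedup: it scans ordered pairs
-- z ≤ o of classes and keeps those with (z*o) % 90 == k % 90 (objective: simpler).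

-- ALL_CLASSES (shared module constant of both Pythons)
def pvAllClasses : List Int := [1,7,11,13,17,19,23,29,31,37,41,43,47,49,53,59,61,67,71,73,77,79,83,89]

-- shared emission code of both Pythons: z_eff/o_eff/l/m, append (l,m,z_eff), and (l,m,o_eff) if z != o
def pvEmit (k z o : Int) : List (Int × Int × Int) :=
  let z_eff : Int := if z = 1 then 91 else z
  let o_eff : Int := if o = 1 then 91 else o
  let l := 180 - (z_eff + o_eff)
  let m := 90 - (z_eff + o_eff) + PySem.Int.floordiv (z_eff * o_eff - k) 90
  (l, m, z_eff) :: (if z ≠ o then [(l, m, o_eff)] else [])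

-- ===== PORT A =====
-- exact port of Python pow(z, -1, 90): the unique inverse in [0,90) (found by scanning the
-- residues); none exactly where Python raises ValueError (gcd(z,90) ≠ 1)
def pvInv90 (z : Int) : Option Int :=
  (PySem.List.pyRange 0 90 1).find? (fun i => PySem.Int.mod (z * i) 90 == 1)

def pvStepA (k : Int) (st : List (Int × Int × Int) × PySem.Set (Int × Int)) (z : Int) :
    List (Int × Int × Int) × PySem.Set (Int × Int) :=
  match pvInv90 z with
  | none => st                                   -- the except: ... continue branch
  | some i =>
    let o := PySem.Int.mod (k * i) 90
    if o ∈ pvAllClasses then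
      let pair := if o < z then (o, z) else (z, o)   -- tuple(sorted([z,o]))
      if pair ∈ st.2 then st
      else (st.1 ++ pvEmit k z o, PySem.Set.add st.2 pair)
    else st

def get_operators (k : Int) : List (Int × Int × Int) :=
  (pvAllClasses.foldl (pvStepA k) ([], ([] : PySem.Set (Int × Int)))).1

-- ===== PORT B =====
-- inner loop: for o in ALL_CLASSES[i:]
def pvInnerB (k r z : Int) (os : List Int) : List (Int × Int × Int) :=
  os.foldl (fun acc o => if PySem.Int.mod (z * o) 90 = r then acc ++ pvEmit k z o else acc) []

-- outer loop over enumerate(ALL_CLASSES), as recursion on suffixes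
def pvGoB (k r : Int) : List Int → List (Int × Int × Int)
  | [] => []
  | z :: rest => pvInnerB k r z (z :: rest) ++ pvGoB k r rest

def get_operators_alt (k : Int) : List (Int × Int × Int) :=
  let r := PySem.Int.mod k 90
  pvGoB k r pvAllClasses

-- ===== PRECONDITION & SPEC =====
def Spec_get_operators (k : Int) (out : List (Int × Int × Int)) : Prop := out = get_operators_alt k
instance (k : Int) (out : List (Int × Int × Int)) : Decidable (Spec_get_operators k out) := by unfold Spec_get_operators; infer_instance

-- ===== CLAIM (what is proved, stated in full; the proofs are below) =====
def Claim_equal_get_operators : Prop := ∀ (k : Int), Dom_get_operators k → Spec_get_operators k (get_operators k)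

-- ===== LEMMAS AND PROOFS =====

-- The pairs (z,o) A emits, as a function of r = k % 90 only (same branch structure as pvStepA)
def pvPairsStepA (r : Int) (st : List (Int × Int) × PySem.Set (Int × Int)) (z : Int) :
    List (Int × Int) × PySem.Set (Int × Int) :=
  match pvInv90 z with
  | none => st
  | some i =>
    let o := PySem.Int.mod (r * i) 90
    if o ∈ pvAllClasses then
      let pair := if o < z then (o, z) else (z, o)
      if pair ∈ st.2 then st
      else (st.1 ++ [(z, o)], PySem.Set.add st.2 pair)
    else st

def pvPairsA (r : Int) : List (Int × Int) :=
  (pvAllClasses.foldl (pvPairsStepA r) ([], ([] : PySem.Set (Int × Int)))).1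

-- The pairs B emits, as a function of r only (same structure as pvInnerB / pvGoB)
def pvPairsInnerB (r z : Int) (os : List Int) : List (Int × Int) :=
  os.foldl (fun acc o => if PySem.Int.mod (z * o) 90 = r then acc ++ [(z, o)] else acc) []

def pvPairsGoB (r : Int) : List Int → List (Int × Int)
  | [] => []
  | z :: rest => pvPairsInnerB r z (z :: rest) ++ pvPairsGoB r rest

lemma pvModMul (k i : Int) :
    PySem.Int.mod (k * i) 90 = PySem.Int.mod (PySem.Int.mod k 90 * i) 90 := by
  simp only [PySem.Int.mod_eq_emod_of_pos (show (0:Int) < 90 by norm_num)]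
  conv_lhs => rw [Int.mul_emod]
  conv_rhs => rw [Int.mul_emod, Int.emod_emod_of_dvd _ (dvd_refl _)]

lemma pvAuxA (k : Int) :
    ∀ (L : List Int) (ps : List (Int × Int)) (seen : PySem.Set (Int × Int)),
      L.foldl (pvStepA k) (ps.flatMap (fun q => pvEmit k q.1 q.2), seen)
        = ((L.foldl (pvPairsStepA (PySem.Int.mod k 90)) (ps, seen)).1.flatMap
             (fun q => pvEmit k q.1 q.2),
           (L.foldl (pvPairsStepA (PySem.Int.mod k 90)) (ps, seen)).2) := by
  intro L
  induction L with
  | nil => intro ps seen; simp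
  | cons z rest ih =>
    intro ps seen
    simp only [List.foldl_cons]
    have ho : PySem.Int.mod (k * (pvInv90 z).getD 0) 90
        = PySem.Int.mod (PySem.Int.mod k 90 * (pvInv90 z).getD 0) 90 := pvModMul ..
    cases h : pvInv90 z with
    | none =>
      simp only [pvStepA, pvPairsStepA, h]
      exact ih ps seen
    | some i =>
      simp only [pvStepA, pvPairsStepA, h]
      rw [pvModMul k i]
      set o := PySem.Int.mod (PySem.Int.mod k 90 * i) 90 with ho'
      by_cases hmem : o ∈ pvAllClasses
      · simp only [hmem, if_true]
        by_cases hseen : (if o < z then (o, z) else (z, o)) ∈ seen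
        · simp only [hseen, if_true]; exact ih ps seen
        · simp only [hseen, if_false]
          have := ih (ps ++ [(z, o)]) (PySem.Set.add seen (if o < z then (o, z) else (z, o)))
          simpa [List.flatMap_append] using this
      · simp only [hmem, if_false]; exact ih ps seen

lemma pvADecomp (k : Int) :
    get_operators k = (pvPairsA (PySem.Int.mod k 90)).flatMap (fun q => pvEmit k q.1 q.2) := by
  have := pvAuxA k pvAllClasses [] ([] : PySem.Set (Int × Int))
  simp only [List.flatMap_nil] at this
  simp [get_operators, pvPairsA, this]

lemma pvInnerBDecomp (k r z : Int) (os : List Int) :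
    pvInnerB k r z os = (pvPairsInnerB r z os).flatMap (fun q => pvEmit k q.1 q.2) := by
  suffices h : ∀ (os : List Int) (acc : List (Int × Int)),
      os.foldl (fun acc o => if PySem.Int.mod (z * o) 90 = r then acc ++ pvEmit k z o else acc)
        (acc.flatMap (fun q => pvEmit k q.1 q.2))
      = (os.foldl (fun acc o => if PySem.Int.mod (z * o) 90 = r then acc ++ [(z, o)] else acc)
          acc).flatMap (fun q => pvEmit k q.1 q.2) by
    have := h os []
    simpa [pvInnerB, pvPairsInnerB] using this
  intro os
  induction os with
  | nil => intro acc; simp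
  | cons o rest ih =>
    intro acc
    simp only [List.foldl_cons]
    by_cases hc : PySem.Int.mod (z * o) 90 = r
    · simp only [hc, if_true]
      have := ih (acc ++ [(z, o)])
      simpa [List.flatMap_append] using this
    · simp only [hc, if_false]; exact ih acc

lemma pvBDecomp (k : Int) :
    get_operators_alt k
      = (pvPairsGoB (PySem.Int.mod k 90) pvAllClasses).flatMap (fun q => pvEmit k q.1 q.2) := by
  show pvGoB k (PySem.Int.mod k 90) pvAllClasses = _
  generalize pvAllClasses = L
  induction L with
  | nil => simp [pvGoB, pvPairsGoB]
  | cons z rest ih =>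
    simp only [pvGoB, pvPairsGoB, List.flatMap_append, pvInnerBDecomp, ih]

-- the 90 residues: the two pair sequences coincide
set_option maxRecDepth 100000 in
lemma pvPairsEq : ∀ r : Fin 90, pvPairsA (r : Int) = pvPairsGoB (r : Int) pvAllClasses := by
  decide

theorem get_operators_spec : Claim_equal_get_operators := by
  intro k _
  unfold Spec_get_operators
  rw [pvADecomp, pvBDecomp]
  have h0 : (0 : Int) ≤ PySem.Int.mod k 90 := PySem.Int.mod_nonneg k (by norm_num)
  have h1 : PySem.Int.mod k 90 < 90 := PySem.Int.mod_lt k (by norm_num)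
  have := pvPairsEq ⟨(PySem.Int.mod k 90).toNat, by omega⟩
  rw [Int.toNat_of_nonneg h0] at this
  rw [this]
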